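-- pv_equiv track=rewrite | github.com/Rulowizard/Chess_Proyect_Speech | chess_speech.py | quitar_duplicados
-- ===== SOURCE A (Python) =====
-- def quitar_duplicados (lista):
--     ind_lista = [ i for i,ele in enumerate(lista) if ele=="1" ]
--     for x in ind_lista:
--         if ind_lista.index(x)< len(ind_lista)-1:
--             if ind_lista[ ind_lista.index(x) ]+3>  ind_lista[ind_lista.index(x)+1]:
--                 del ind_lista[ind_lista.index(x)+1]
--         if ind_lista.index(x)< len(ind_lista)-2:
--             if ind_lista[ ind_lista.index(x) ]+3>  ind_lista[ind_lista.index(x)+1]: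
--                 del ind_lista[ind_lista.index(x)+1]
--     for x in ind_lista:
--         lista = [ "-" if ind>x and ind<x+3 else ele for ind,ele in enumerate(lista) ]
--     return lista
-- ===== SOURCE B (Python) =====
-- def quitar_duplicados(lista):
--     # One pass: keep a "1" only if it is >= 3 cells after the last kept "1";
--     # any cell within 2 positions after a kept "1" becomes "-".
--     out = []
--     last = None
--     for i, ele in enumerate(lista):
--         if last is not None and i < last + 3:
--             out.append("-")
--         elif ele == "1":
--             out.append(ele)
--             last = i
--         else:
--             out.append(ele)
--     return out
-- ===== Notes on version B (the rewrite author's own statement) =====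
-- stated objective: simpler
-- what changed: Replaced the dedup loop over the '1'-index list (repeated list.index and del) plus one full rewrite pass of the board per kept marker by a single left-to-right pass that tracks only the last kept '1' position and emits each output cell directly.
-- intended difference: When the '1' cells end at three consecutive positions j, j+1, j+2 with j the last kept marker, A's 'index < len-2' guard skips deleting the final close duplicate j+2, so A also blanks the cells j+3 and j+4; B drops that duplicate like every other close duplicate and leaves j+3/j+4 untouched, the intended dedup behaviour. — e.g. on quitar_duplicados(["1", "1", "1", "x"]): A returns ["1", "-", "-", "-"], B returns ["1", "-", "-", "x"]
import Mathlib
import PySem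

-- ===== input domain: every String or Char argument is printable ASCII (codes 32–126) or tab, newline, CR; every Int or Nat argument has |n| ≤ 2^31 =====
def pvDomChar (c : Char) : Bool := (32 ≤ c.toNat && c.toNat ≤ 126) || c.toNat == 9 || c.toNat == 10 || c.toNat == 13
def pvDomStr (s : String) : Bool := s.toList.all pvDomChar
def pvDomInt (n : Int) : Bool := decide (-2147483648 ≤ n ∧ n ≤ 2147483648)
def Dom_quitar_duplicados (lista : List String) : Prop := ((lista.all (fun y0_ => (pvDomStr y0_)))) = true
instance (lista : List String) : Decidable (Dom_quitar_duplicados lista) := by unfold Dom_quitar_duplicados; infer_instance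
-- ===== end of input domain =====

-- B makes one left-to-right pass tracking the last kept '1' marker; A's off-by-one in its second dedup guard (see D_ below) is not reproduced.

-- ===== PORT A =====
-- ind_lista.index(x); in A's loop x is always present, so the default never fires
def pvIdxOf (l : List Int) (v : Int) : Nat := (PySem.List.index? l v).getD 0

-- first `if` block of A's dedup loop: delete the next index if it is closer than 3
def pvStep1 (ind : List Int) (x : Int) : List Int :=
  if (pvIdxOf ind x : Int) < (ind.length : Int) - 1 ∧
      ind.getD (pvIdxOf ind x) 0 + 3 > ind.getD (pvIdxOf ind x + 1) 0 then
    ind.eraseIdx (pvIdxOf ind x + 1)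
  else ind

-- second `if` block: same deletion, but guarded by index < len - 2
def pvStep2 (ind : List Int) (x : Int) : List Int :=
  if (pvIdxOf ind x : Int) < (ind.length : Int) - 2 ∧
      ind.getD (pvIdxOf ind x) 0 + 3 > ind.getD (pvIdxOf ind x + 1) 0 then
    ind.eraseIdx (pvIdxOf ind x + 1)
  else ind

-- `for x in ind_lista:` over the list being mutated = CPython cursor semantics;
-- fuel = initial length bounds the iteration count (the cursor advances, the list never grows)
def pvLoopA (fuel : Nat) (ind : List Int) (i : Nat) : List Int :=
  match fuel with
  | 0 => ind
  | fuel + 1 =>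
    if i < ind.length then
      pvLoopA fuel (pvStep2 (pvStep1 ind (ind.getD i 0)) (ind.getD i 0)) (i+1)
    else ind

-- [ i for i,ele in enumerate(lista) if ele=="1" ]
def pvIndListaA (lista : List String) : List Int :=
  (PySem.List.enumerate lista).filterMap (fun p => if p.2 = "1" then some p.1 else none)

def quitar_duplicados (lista : List String) : List String :=
  let ind0 := pvIndListaA lista
  let ind := pvLoopA ind0.length ind0 0
  ind.foldl (fun l x =>
    (PySem.List.enumerate l).map (fun p => if p.1 > x ∧ p.1 < x + 3 then "-" else p.2)) lista

-- ===== PORT B =====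
-- loop body of Source B: state = (out, last)
def pvStepB (s : List String × Option Int) (p : Int × String) : List String × Option Int :=
  match s.2 with
  | some m =>
      if p.1 < m + 3 then (s.1 ++ ["-"], s.2)
      else if p.2 = "1" then (s.1 ++ [p.2], some p.1)
      else (s.1 ++ [p.2], s.2)
  | none =>
      if p.2 = "1" then (s.1 ++ [p.2], some p.1)
      else (s.1 ++ [p.2], s.2)

def quitar_duplicados_alt (lista : List String) : List String :=
  ((PySem.List.enumerate lista).foldl pvStepB ([], none)).1

-- ===== PRECONDITION & SPEC =====
-- A returns the wrong value exactly when the positions of the "1" cells end with the two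
-- close duplicates j+1, j+2 of the last kept marker j (kept = at distance >= 3 from the
-- previously kept marker; the fold below computes b = j+3): A's 'index < len-2' guard then
-- skips deleting the final close duplicate j+2 and A additionally blanks the cells j+3 and
-- j+4 - visible whenever one of them is present and not already "-"; B deletes j+2 like
-- every other close duplicate and leaves j+3/j+4 untouched, the intended dedup behaviour.
def D_quitar_duplicados (lista : List String) : Prop :=
  let os := lista.findIdxs (· == "1")
  let b := os.foldl (fun b k => if k < b then b else k + 3) 0
  [b - 2, b - 1] <:+ os ∧ ¬ (lista.drop b).take 2 ⊆ ["-"]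
instance (lista : List String) : Decidable (D_quitar_duplicados lista) := by
  unfold D_quitar_duplicados; infer_instance

def Spec_quitar_duplicados (lista : List String) (out : List String) : Prop :=
  ¬ D_quitar_duplicados lista → out = quitar_duplicados_alt lista
instance (lista : List String) (out : List String) : Decidable (Spec_quitar_duplicados lista out) := by
  unfold Spec_quitar_duplicados; infer_instance

def pvDiffWitness_quitar_duplicados : List String := ["1", "1", "1", "x"]
def pvDiffWitnessOut_quitar_duplicados : (List String) × (List String) :=
  (["1", "-", "-", "-"], ["1", "-", "-", "x"])

-- ===== CLAIM (what is proved, stated in full; the proofs are below) =====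
def Claim_unchanged_quitar_duplicados : Prop := ∀ (lista : List String), Dom_quitar_duplicados lista → Spec_quitar_duplicados lista (quitar_duplicados lista)
def Claim_changed_quitar_duplicados : Prop := Dom_quitar_duplicados (pvDiffWitness_quitar_duplicados) ∧ D_quitar_duplicados (pvDiffWitness_quitar_duplicados) ∧ quitar_duplicados (pvDiffWitness_quitar_duplicados) = pvDiffWitnessOut_quitar_duplicados.1 ∧ quitar_duplicados_alt (pvDiffWitness_quitar_duplicados) = pvDiffWitnessOut_quitar_duplicados.2 ∧ pvDiffWitnessOut_quitar_duplicados.1 ≠ pvDiffWitnessOut_quitar_duplicados.2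
def Claim_exact_quitar_duplicados : Prop := ∀ (lista : List String), Dom_quitar_duplicados lista → D_quitar_duplicados lista → quitar_duplicados lista ≠ quitar_duplicados_alt lista

-- ===== LEMMAS AND PROOFS =====

-- positions of the "1" cells as Ints, counting from i (reference version for the proofs)
def pvOnes (lista : List String) (i : Int) : List Int :=
  match lista with
  | [] => []
  | e :: rest => if e = "1" then i :: pvOnes rest (i+1) else pvOnes rest (i+1)

-- greedy dedup of the '1'-position list: keep a marker, drop all markers closer than 3 after it
def pvGreAux : List Int → Int → List Int
  | [], _ => []
  | x :: t, m => if x < m + 3 then pvGreAux t m else x :: pvGreAux t x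

def pvGre : List Int → List Int
  | [] => []
  | x :: t => x :: pvGreAux t x

-- A's surviving markers: like pvGre, except that when exactly the two close duplicates
-- x+1, x+2 end the list, the second one survives (A's off-by-one)
def pvAkept : List Int → List Int
  | [] => []
  | x :: xs =>
    if xs = [x+1, x+2] then [x, x+2]
    else x :: pvAkept (xs.dropWhile (fun y => y < x + 3))
termination_by xs => xs.length
decreasing_by
  simp only [List.length_cons]
  exact Nat.lt_succ_of_le (List.length_dropWhile_le _ _)

def pvWin (last : Option Int) (j : Int) : Bool :=
  match last with
  | some m => decide (j < m + 3)
  | none => false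

def pvCov (ks : List Int) (j : Int) : Bool :=
  ks.any (fun k => decide (k < j) && decide (j < k + 3))

def pvKept : List String → Int → Option Int → List Int
  | [], _, _ => []
  | e :: rest, i, last =>
    if pvWin last i then pvKept rest (i+1) last
    else if e = "1" then i :: pvKept rest (i+1) (some i)
    else pvKept rest (i+1) last

def pvGo : List (Int × String) → Option Int → List String
  | [], _ => []
  | p :: ps, last =>
    if pvWin last p.1 then "-" :: pvGo ps last
    else if p.2 = "1" then p.2 :: pvGo ps (some p.1)
    else p.2 :: pvGo ps last

def pvDropWin (last : Option Int) (xs : List Int) : List Int :=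
  match last with
  | none => xs
  | some m => xs.dropWhile (fun y => y < m + 3)

lemma pv_ones_eq (l : List String) (s : Int) :
    (PySem.List.enumerate l s).filterMap (fun p => if p.2 = "1" then some p.1 else none)
      = pvOnes l s := by
  induction l generalizing s with
  | nil => simp [pvOnes, PySem.List.enumerate_nil]
  | cons e rest ih =>
      simp only [PySem.List.enumerate_cons, List.filterMap_cons, pvOnes]
      by_cases he : e = "1" <;> simp [he, ih]

lemma pv_onesA_eq (l : List String) : pvIndListaA l = pvOnes l 0 := pv_ones_eq l 0

lemma pv_ones_lb (l : List String) (s : Int) : ∀ x ∈ pvOnes l s, s ≤ x := by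
  induction l generalizing s with
  | nil => simp [pvOnes]
  | cons e rest ih =>
      intro x hx
      by_cases he : e = "1" <;> simp only [pvOnes, he, if_pos, if_neg, not_false_iff,
        List.mem_cons] at hx
      · rcases hx with rfl | hx
        · exact le_rfl
        · have := ih (s+1) x hx; omega
      · have := ih (s+1) x hx; omega

lemma pv_ones_pairwise (l : List String) (s : Int) : (pvOnes l s).Pairwise (· < ·) := by
  induction l generalizing s with
  | nil => simp [pvOnes]
  | cons e rest ih =>
      by_cases he : e = "1" <;> simp [pvOnes, he]
      · exact ⟨fun x hx => by have := pv_ones_lb rest (s+1) x hx; omega, ih (s+1)⟩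
      · exact ih (s+1)

-- index of x in K ++ x :: t is |K| when x ∉ K
lemma pv_index_append (K : List Int) (x : Int) (t : List Int) (hx : x ∉ K) :
    PySem.List.index? (K ++ x :: t) x = some K.length := by
  induction K with
  | nil => simpa using PySem.List.index?_cons_self x t
  | cons k K ih =>
      have hk : k ≠ x := by intro h; exact hx (by simp [h])
      have hx' : x ∉ K := fun h => hx (by simp [h])
      rw [List.cons_append, PySem.List.index?_cons_of_ne _ hk, ih hx']
      simp

lemma pv_idx_append (K : List Int) (x : Int) (t : List Int) (hx : x ∉ K) :
    pvIdxOf (K ++ x :: t) x = K.length := by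
  unfold pvIdxOf
  rw [pv_index_append K x t hx]
  rfl

-- getD at the junction
lemma pv_getD_mid (K : List Int) (x : Int) (t : List Int) :
    (K ++ x :: t).getD K.length 0 = x := by
  simp [List.getD_eq_getElem?_getD]

lemma pv_getD_mid1 (K : List Int) (x a : Int) (t : List Int) :
    (K ++ x :: a :: t).getD (K.length + 1) 0 = a := by
  simp [List.getD_eq_getElem?_getD,
    ]

lemma pv_erase_mid (K : List Int) (x a : Int) (t : List Int) :
    (K ++ x :: a :: t).eraseIdx (K.length + 1) = K ++ x :: t := by
  rw [List.eraseIdx_append_of_length_le (by omega : K.length ≤ K.length + 1)]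
  simp [List.eraseIdx]

lemma pv_gre_cons (x : Int) (t : List Int) :
    pvGre (x :: t) = x :: pvGre (t.dropWhile (fun y => y < x + 3)) := by
  suffices h : ∀ (t : List Int) (m : Int), pvGreAux t m = pvGre (t.dropWhile (fun y => y < m + 3)) by
    simp [pvGre, h t x]
  intro t
  induction t with
  | nil => intro m; simp [pvGreAux, pvGre]
  | cons a t ih =>
      intro m
      by_cases ha : a < m + 3
      · simp [pvGreAux, ha, ih m]
      · simp [pvGreAux, ha, pvGre, ih a]

lemma pv_s1_nil (K : List Int) (x : Int) (hx : x ∉ K) :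
    pvStep1 (K ++ [x]) x = K ++ [x] := by
  unfold pvStep1
  rw [pv_idx_append K x [] hx]
  rw [if_neg]
  simp only [List.length_append, List.length_cons, List.length_nil]
  push_cast
  intro h
  omega

lemma pv_s1_keep (K : List Int) (x a : Int) (ys : List Int) (hx : x ∉ K) (h : ¬ x + 3 > a) :
    pvStep1 (K ++ x :: a :: ys) x = K ++ x :: a :: ys := by
  unfold pvStep1
  rw [pv_idx_append K x (a :: ys) hx, pv_getD_mid, pv_getD_mid1]
  rw [if_neg]
  intro hc
  exact h hc.2

lemma pv_s1_del (K : List Int) (x a : Int) (ys : List Int) (hx : x ∉ K) (h : x + 3 > a) :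
    pvStep1 (K ++ x :: a :: ys) x = K ++ x :: ys := by
  unfold pvStep1
  rw [pv_idx_append K x (a :: ys) hx, pv_getD_mid, pv_getD_mid1]
  rw [if_pos, pv_erase_mid]
  constructor
  · simp only [List.length_append, List.length_cons]
    push_cast
    omega
  · exact h

lemma pv_s2_nil (K : List Int) (x : Int) (hx : x ∉ K) :
    pvStep2 (K ++ [x]) x = K ++ [x] := by
  unfold pvStep2
  rw [pv_idx_append K x [] hx]
  rw [if_neg]
  simp only [List.length_append, List.length_cons, List.length_nil]
  push_cast
  intro h
  omega

lemma pv_s2_pair (K : List Int) (x a : Int) (hx : x ∉ K) :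
    pvStep2 (K ++ [x, a]) x = K ++ [x, a] := by
  unfold pvStep2
  rw [(by simp : K ++ [x, a] = K ++ x :: a :: ([] : List Int))]
  rw [pv_idx_append K x [a] hx]
  rw [if_neg]
  simp only [List.length_append, List.length_cons, List.length_nil]
  push_cast
  intro h
  omega

lemma pv_s2_keep (K : List Int) (x a : Int) (ys : List Int) (hx : x ∉ K) (h : ¬ x + 3 > a) :
    pvStep2 (K ++ x :: a :: ys) x = K ++ x :: a :: ys := by
  unfold pvStep2
  rw [pv_idx_append K x (a :: ys) hx, pv_getD_mid, pv_getD_mid1]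
  rw [if_neg]
  intro hc
  exact h hc.2

lemma pv_s2_del (K : List Int) (x a b : Int) (zs : List Int) (hx : x ∉ K) (h : x + 3 > a) :
    pvStep2 (K ++ x :: a :: b :: zs) x = K ++ x :: b :: zs := by
  unfold pvStep2
  rw [pv_idx_append K x (a :: b :: zs) hx, pv_getD_mid, pv_getD_mid1]
  rw [if_pos, pv_erase_mid]
  constructor
  · simp only [List.length_append, List.length_cons]
    push_cast
    omega
  · exact h

lemma pv_loopA_done (fuel : Nat) (K : List Int) : pvLoopA fuel K K.length = K := by
  cases fuel <;> simp [pvLoopA]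

lemma pv_sub_help (K : List Int) (x : Int) {R' xs : List Int} (h : List.Sublist R' xs) :
    List.Sublist ((K ++ [x]) ++ R') (K ++ x :: xs) := by
  have he : (K ++ [x]) ++ R' = K ++ x :: R' := by simp
  rw [he]
  exact List.Sublist.append_left (h.cons₂ x) K

-- the cursor loop computes pvAkept
lemma pv_loopA_eq (R : List Int) : ∀ (fuel : Nat) (K : List Int), R.length ≤ fuel →
    (K ++ R).Pairwise (· < ·) → pvLoopA fuel (K ++ R) K.length = K ++ pvAkept R := by
  suffices H : ∀ (n : Nat) (R : List Int), R.length ≤ n → ∀ (fuel : Nat) (K : List Int),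
      R.length ≤ fuel → (K ++ R).Pairwise (· < ·) →
      pvLoopA fuel (K ++ R) K.length = K ++ pvAkept R by
    intro fuel K hf hp
    exact H R.length R le_rfl fuel K hf hp
  intro n
  induction n with
  | zero =>
      intro R hR fuel K _ _
      have hR0 : R = [] := List.length_eq_zero_iff.mp (Nat.le_zero.mp hR)
      subst hR0
      simp [pvAkept, pv_loopA_done]
  | succ n ih =>
      intro R hR fuel K hf hp
      rcases R with _ | ⟨x, xs⟩
      · simp [pvAkept, pv_loopA_done]
      rcases fuel with _ | f
      · simp at hf
      have hxK : x ∉ K := by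
        intro hmem
        rw [List.pairwise_append] at hp
        exact absurd (hp.2.2 x hmem x (by simp)) (lt_irrefl x)
      have hlen : K.length < (K ++ x :: xs).length := by simp
      have hget : (K ++ x :: xs).getD K.length 0 = x := pv_getD_mid K x xs
      simp only [pvLoopA]
      rw [if_pos hlen, hget]
      have hrel : (x :: xs).Pairwise (· < ·) :=
        hp.sublist (List.sublist_append_right K _)
      rcases xs with _ | ⟨a, ys⟩
      · rw [pv_s1_nil K x hxK, pv_s2_nil K x hxK]
        have hL : K.length + 1 = (K ++ [x]).length := by simp
        rw [hL, pv_loopA_done]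
        simp [pvAkept]
      have hxa : x < a := (List.pairwise_cons.mp hrel).1 a (by simp)
      by_cases hax : x + 3 > a
      · rw [pv_s1_del K x a ys hxK hax]
        rcases ys with _ | ⟨b, zs⟩
        · rw [pv_s2_nil K x hxK]
          have hL : K.length + 1 = (K ++ [x]).length := by simp
          rw [hL, pv_loopA_done]
          simp [pvAkept, hax]
        have hab : a < b := (List.pairwise_cons.mp ((List.pairwise_cons.mp hrel).2)).1 b (by simp)
        by_cases hbx : x + 3 > b
        · rcases zs with _ | ⟨c, ws⟩
          · -- A's off-by-one: the close duplicate b = x+2 ends the list and survives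
            rw [(by simp : K ++ x :: [b] = K ++ [x, b]), pv_s2_pair K x b hxK]
            have hp' : ((K ++ [x]) ++ [b]).Pairwise (· < ·) :=
              hp.sublist (pv_sub_help K x ((List.Sublist.refl [b]).cons a))
            have hL : K.length + 1 = (K ++ [x]).length := by simp
            rw [(by simp : K ++ [x, b] = (K ++ [x]) ++ [b]), hL]
            rw [ih [b] (by simp at hR ⊢; omega) f (K ++ [x]) (by simp at hf ⊢; omega) hp']
            have ha1 : a = x + 1 := by omega
            have hb1 : b = x + 2 := by omega
            subst ha1; subst hb1
            simp [pvAkept]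
          · -- two close duplicates followed by more markers: both deleted
            rw [pv_s2_del K x b c ws hxK hbx]
            have hp' : ((K ++ [x]) ++ c :: ws).Pairwise (· < ·) :=
              hp.sublist (pv_sub_help K x (((List.Sublist.refl (c :: ws)).cons b).cons a))
            have hL : K.length + 1 = (K ++ [x]).length := by simp
            rw [(by simp : K ++ x :: c :: ws = (K ++ [x]) ++ c :: ws), hL]
            rw [ih (c :: ws) (by simp at hR ⊢; omega) f (K ++ [x]) (by simp at hf ⊢; omega) hp']
            have hbc : b < c := by
              have h3 := (List.pairwise_cons.mp ((List.pairwise_cons.mp hrel).2)).2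
              exact (List.pairwise_cons.mp h3).1 c (by simp)
            have ha1 : a = x + 1 := by omega
            have hb1 : b = x + 2 := by omega
            have hcx : ¬ (c < x + 3) := by omega
            have hg : a :: b :: c :: ws ≠ [x+1, x+2] := by intro hq; simp at hq
            have hA : pvAkept (x :: a :: b :: c :: ws) = x :: pvAkept (c :: ws) := by
              rw [pvAkept, if_neg hg]
              simp [hax, hbx, hcx]
            rw [hA]
            simp
        · -- second marker is far: only the first close duplicate is deleted
          rw [pv_s2_keep K x b zs hxK hbx]
          have hp' : ((K ++ [x]) ++ b :: zs).Pairwise (· < ·) :=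
            hp.sublist (pv_sub_help K x ((List.Sublist.refl (b :: zs)).cons a))
          have hL : K.length + 1 = (K ++ [x]).length := by simp
          rw [(by simp : K ++ x :: b :: zs = (K ++ [x]) ++ b :: zs), hL]
          rw [ih (b :: zs) (by simp at hR ⊢; omega) f (K ++ [x]) (by simp at hf ⊢; omega) hp']
          have hg : a :: b :: zs ≠ [x+1, x+2] := by
            intro hq
            simp only [List.cons.injEq] at hq
            omega
          have hA : pvAkept (x :: a :: b :: zs) = x :: pvAkept (b :: zs) := by
            rw [pvAkept, if_neg hg]
            simp [hax, hbx]
          rw [hA]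
          simp
      · -- next marker is far: nothing is deleted
        rw [pv_s1_keep K x a ys hxK hax, pv_s2_keep K x a ys hxK hax]
        have hp' : ((K ++ [x]) ++ a :: ys).Pairwise (· < ·) :=
          hp.sublist (pv_sub_help K x (List.Sublist.refl (a :: ys)))
        have hL : K.length + 1 = (K ++ [x]).length := by simp
        rw [(by simp : K ++ x :: a :: ys = (K ++ [x]) ++ a :: ys), hL]
        rw [ih (a :: ys) (by simp at hR ⊢; omega) f (K ++ [x]) (by simp at hf ⊢; omega) hp']
        have hg : a :: ys ≠ [x+1, x+2] := by
          intro hq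
          simp only [List.cons.injEq] at hq
          omega
        have hA : pvAkept (x :: a :: ys) = x :: pvAkept (a :: ys) := by
          rw [pvAkept, if_neg hg]
          simp [hax]
        rw [hA]
        simp

-- A's kept list is the greedy one, or greedy plus one trailing duplicate (the off-by-one)
lemma pv_dichotomy (R : List Int) (hp : R.Pairwise (· < ·)) :
    pvAkept R = pvGre R ∨
      ∃ y, ([y, y+1, y+2] <:+ R) ∧ y ∈ pvGre R ∧ (∃ t, pvGre R = t ++ [y]) ∧
        pvAkept R = pvGre R ++ [y+2] := by
  revert hp
  suffices H : ∀ (n : Nat) (R : List Int), R.length ≤ n → R.Pairwise (· < ·) →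
      pvAkept R = pvGre R ∨
        ∃ y, ([y, y+1, y+2] <:+ R) ∧ y ∈ pvGre R ∧ (∃ t, pvGre R = t ++ [y]) ∧
          pvAkept R = pvGre R ++ [y+2] by
    exact H R.length R le_rfl
  intro n
  induction n with
  | zero =>
      intro R hR _
      have hR0 : R = [] := List.length_eq_zero_iff.mp (Nat.le_zero.mp hR)
      subst hR0
      left
      simp [pvAkept, pvGre]
  | succ n ih =>
      intro R hR hp
      rcases R with _ | ⟨x, xs⟩
      · left; simp [pvAkept, pvGre]
      by_cases hg : xs = [x+1, x+2]
      · right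
        subst hg
        have hgre : pvGre (x :: (x+1) :: (x+2) :: []) = [x] := by
          rw [pv_gre_cons]
          simp [show x+1 < x+3 by omega, show x+2 < x+3 by omega, pvGre]
        refine ⟨x, List.suffix_refl _, ?_, ?_, ?_⟩
        · rw [hgre]; simp
        · exact ⟨[], by rw [hgre]; rfl⟩
        · rw [pvAkept, if_pos rfl, hgre]; rfl
      · have hpxs : xs.Pairwise (· < ·) := (List.pairwise_cons.mp hp).2
        have hpd : (xs.dropWhile (fun y => y < x + 3)).Pairwise (· < ·) :=
          hpxs.sublist (List.dropWhile_sublist _)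
        have hlen : (xs.dropWhile (fun y => y < x+3)).length ≤ n :=
          le_trans (List.length_dropWhile_le _ _) (by simp at hR; omega)
        rcases ih _ hlen hpd with heq | ⟨y, hsuf, hmem, ⟨t, hgt⟩, hak⟩
        · left
          rw [pvAkept, if_neg hg, pv_gre_cons, heq]
        · right
          refine ⟨y, ?_, ?_, ?_, ?_⟩
          · exact hsuf.trans ((List.dropWhile_suffix _).trans (List.suffix_cons x xs))
          · rw [pv_gre_cons]; exact List.mem_cons_of_mem x hmem
          · exact ⟨x :: t, by rw [pv_gre_cons, hgt]; rfl⟩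
          · rw [pvAkept, if_neg hg, pv_gre_cons, hak]; rfl

lemma pv_enum_map {α β : Type} (l : List α) (s : Int) (g : Int × α → β) :
    PySem.List.enumerate ((PySem.List.enumerate l s).map g) s
      = (PySem.List.enumerate l s).map (fun p => (p.1, g p)) := by
  induction l generalizing s with
  | nil => simp [PySem.List.enumerate_nil]
  | cons e rest ih => simp [PySem.List.enumerate_cons, ih]

-- A's blanking foldl, pointwise
lemma pv_blank_eq (ks : List Int) (l : List String) :
    ks.foldl (fun l x =>
        (PySem.List.enumerate l).map (fun p => if p.1 > x ∧ p.1 < x + 3 then "-" else p.2)) l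
      = (PySem.List.enumerate l).map (fun p => if pvCov ks p.1 then "-" else p.2) := by
  induction ks generalizing l with
  | nil =>
      simp only [List.foldl_nil, pvCov, List.any_nil, if_neg Bool.false_ne_true]
      exact (PySem.List.map_snd_enumerate l 0).symm
  | cons k ks ih =>
      rw [List.foldl_cons, ih, pv_enum_map, List.map_map]
      apply List.map_congr_left
      intro p _
      simp only [Function.comp_apply]
      by_cases h1 : pvCov ks p.1 = true
      · have h2 : pvCov (k :: ks) p.1 = true := by
          simp only [pvCov, List.any_cons] at h1 ⊢
          simp [h1]
        simp [h1, h2]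
      · have h1' : pvCov ks p.1 = false := Bool.eq_false_iff.mpr h1
        by_cases h2 : k < p.1 ∧ p.1 < k + 3
        · have h3 : pvCov (k :: ks) p.1 = true := by
            simp only [pvCov, List.any_cons]
            simp [h2.1, h2.2]
          simp [h1', h2, h3]
        · have h3 : pvCov (k :: ks) p.1 = false := by
            simp only [pvCov, List.any_cons, Bool.or_eq_false_iff, Bool.and_eq_false_iff]
            constructor
            · by_cases hk : k < p.1
              · right; simp only [decide_eq_false_iff_not]; intro hlt; exact h2 ⟨hk, hlt⟩
              · left; simp only [decide_eq_false_iff_not]; exact hk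
            · simpa [pvCov] using h1'
          have h2' : ¬ (p.1 > k ∧ p.1 < k + 3) := h2
          simp [h1', h2', h3]

-- B's foldl = out ++ pvGo
lemma pv_foldl_go (ps : List (Int × String)) (out : List String) (last : Option Int) :
    (ps.foldl pvStepB (out, last)).1 = out ++ pvGo ps last := by
  induction ps generalizing out last with
  | nil => simp [pvGo]
  | cons p ps ih =>
      rw [List.foldl_cons]
      cases last with
      | none =>
          by_cases h : p.2 = "1" <;>
            simp [pvStepB, pvGo, pvWin, h, ih, List.append_assoc]
      | some m =>
          by_cases hw : p.1 < m + 3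
          · simp [pvStepB, pvGo, pvWin, hw, ih, List.append_assoc]
          · by_cases h : p.2 = "1" <;>
              simp [pvStepB, pvGo, pvWin, hw, h, ih, List.append_assoc]

lemma pv_kept_ge (l : List String) : ∀ (i : Int) (last : Option Int) (k : Int),
    k ∈ pvKept l i last → i ≤ k := by
  induction l with
  | nil => intro i last k h; simp [pvKept] at h
  | cons e rest ih =>
      intro i last k h
      unfold pvKept at h
      split_ifs at h with h1 h2
      · have := ih (i+1) last k h; omega
      · rcases List.mem_cons.mp h with rfl | h'
        · exact le_rfl
        · have := ih (i+1) (some i) k h'; omega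
      · have := ih (i+1) last k h; omega

lemma pv_cov_false (ks : List Int) (j : Int) (h : ∀ k ∈ ks, j ≤ k) : pvCov ks j = false := by
  simp only [pvCov, List.any_eq_false]
  intro k hk
  simp only [Bool.and_eq_true, decide_eq_true_eq, not_and]
  intro hlt
  have := h k hk
  omega

-- B's pass, pointwise
lemma pv_go_eq (l : List String) : ∀ (i : Int) (last : Option Int),
    pvGo (PySem.List.enumerate l i) last
      = (PySem.List.enumerate l i).map
          (fun p => if pvWin last p.1 || pvCov (pvKept l i last) p.1 then "-" else p.2) := by
  induction l with
  | nil => intro i last; simp [PySem.List.enumerate_nil, pvGo]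
  | cons e rest ih =>
      intro i last
      rw [PySem.List.enumerate_cons, List.map_cons]
      by_cases hw : pvWin last i = true
      · have hk : pvKept (e :: rest) i last = pvKept rest (i+1) last := by
          rw [pvKept.eq_2, if_pos hw]
        have hgo : pvGo ((i, e) :: PySem.List.enumerate rest (i+1)) last
            = "-" :: pvGo (PySem.List.enumerate rest (i+1)) last := by
          rw [pvGo.eq_2, if_pos hw]
        rw [hgo, ih, hk]
        congr 1
        simp [hw]
      · have hw' : pvWin last i = false := Bool.eq_false_iff.mpr hw
        have hwlast : ∀ j : Int, i < j → pvWin last j = false := by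
          intro j hj
          cases last with
          | none => rfl
          | some m =>
              simp only [pvWin, decide_eq_false_iff_not] at hw' ⊢
              omega
        by_cases he : e = "1"
        · have hk : pvKept (e :: rest) i last = i :: pvKept rest (i+1) (some i) := by
            rw [pvKept.eq_2, if_neg (by simp [hw']), if_pos he]
          have hgo : pvGo ((i, e) :: PySem.List.enumerate rest (i+1)) last
              = e :: pvGo (PySem.List.enumerate rest (i+1)) (some i) := by
            rw [pvGo.eq_2, if_neg (by simp [hw']), if_pos he]
          rw [hgo, ih, hk]
          have hcov0 : pvCov (i :: pvKept rest (i+1) (some i)) i = false := by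
            apply pv_cov_false
            intro k hk'
            rcases List.mem_cons.mp hk' with rfl | h'
            · exact le_rfl
            · have := pv_kept_ge rest (i+1) (some i) k h'; omega
          congr 1
          · simp [hw', hcov0]
          · apply List.map_congr_left
            intro p hp
            obtain ⟨k', hk', rfl⟩ := (PySem.List.mem_enumerate_iff _ _ _).mp hp
            have hw2 : pvWin last ((i+1) + (k' : Int)) = false := hwlast _ (by omega)
            simp only [hw2, Bool.false_or]
            simp only [pvWin, pvCov, List.any_cons]
            have h5 : decide (i < (i+1) + (k' : Int)) = true := decide_eq_true (by omega)
            simp only [h5, Bool.true_and]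
            rfl
        · have hk : pvKept (e :: rest) i last = pvKept rest (i+1) last := by
            rw [pvKept.eq_2, if_neg (by simp [hw']), if_neg he]
          have hgo : pvGo ((i, e) :: PySem.List.enumerate rest (i+1)) last
              = e :: pvGo (PySem.List.enumerate rest (i+1)) last := by
            rw [pvGo.eq_2, if_neg (by simp [hw']), if_neg he]
          rw [hgo, ih, hk]
          have hcov0 : pvCov (pvKept rest (i+1) last) i = false := by
            apply pv_cov_false
            intro k hk'
            have := pv_kept_ge rest (i+1) last k hk'; omega
          congr 1
          simp [hw', hcov0]

-- B's kept markers are the greedy ones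
lemma pv_kept_gre (l : List String) : ∀ (i : Int) (last : Option Int),
    pvKept l i last = pvGre (pvDropWin last (pvOnes l i)) := by
  induction l with
  | nil => intro i last; cases last <;> simp [pvKept, pvOnes, pvDropWin, pvGre]
  | cons e rest ih =>
      intro i last
      by_cases hw : pvWin last i = true
      · rcases last with _ | m
        · simp [pvWin] at hw
        have him : i < m + 3 := by simpa [pvWin] using hw
        rw [pvKept.eq_2, if_pos hw, ih]
        by_cases he : e = "1"
        · simp [pvOnes, he, pvDropWin, him]
        · simp [pvOnes, he, pvDropWin]
      · have hw' : pvWin last i = false := Bool.eq_false_iff.mpr hw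
        by_cases he : e = "1"
        · rw [pvKept.eq_2, if_neg (by simp [hw']), if_pos he, ih]
          rcases last with _ | m
          · have hones : pvOnes (e :: rest) i = i :: pvOnes rest (i+1) := by
              simp [pvOnes, he]
            show i :: pvGre (pvDropWin (some i) (pvOnes rest (i+1)))
                = pvGre (pvDropWin none (pvOnes (e :: rest) i))
            rw [hones]
            simp only [pvDropWin]
            rw [pv_gre_cons]
          · have him : ¬ (i < m + 3) := by
              simpa [pvWin] using hw'
            have hones : pvOnes (e :: rest) i = i :: pvOnes rest (i+1) := by
              simp [pvOnes, he]
            show i :: pvGre (pvDropWin (some i) (pvOnes rest (i+1)))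
                = pvGre (pvDropWin (some m) (pvOnes (e :: rest) i))
            rw [hones]
            simp only [pvDropWin]
            rw [List.dropWhile_cons, if_neg (by simpa using him), pv_gre_cons]
        · rw [pvKept.eq_2, if_neg (by simp [hw']), if_neg he, ih]
          simp [pvOnes, he, pvDropWin]

lemma pv_last_cons (x m : Int) (A : List Int) :
    ((x :: A).getLast?).getD m = (A.getLast?).getD x := by
  cases A with
  | nil => simp
  | cons b B =>
      rw [List.getLast?_cons_cons]
      obtain ⟨z, hz⟩ := Option.isSome_iff_exists.mp
        (by simp [List.getLast?_isSome] : (b :: B).getLast?.isSome = true)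
      rw [hz]
      rfl

-- the b-fold of D_ is the g-fold shifted by 3
lemma pv_fold_shift (xs : List Int) : ∀ m : Int,
    xs.foldl (fun b k => if k < b then b else k + 3) (m + 3)
      = xs.foldl (fun g k => if k < g + 3 then g else k) m + 3 := by
  induction xs with
  | nil => intro m; simp
  | cons x t ih =>
      intro m
      rw [List.foldl_cons, List.foldl_cons]
      by_cases hx : x < m + 3
      · rw [if_pos hx, if_pos hx, ih m]
      · rw [if_neg hx, if_neg hx, ih x]

-- the g-fold computes the last element of the greedy kept list
lemma pv_fold_aux (t : List Int) : ∀ m : Int,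
    t.foldl (fun g k => if k < g + 3 then g else k) m = ((pvGreAux t m).getLast?).getD m := by
  induction t with
  | nil => intro m; simp [pvGreAux]
  | cons x t ih =>
      intro m
      rw [List.foldl_cons]
      by_cases hx : x < m + 3
      · simp only [pvGreAux, if_pos hx]
        exact ih m
      · simp only [pvGreAux, if_neg hx]
        rw [ih x, pv_last_cons]

lemma pv_fold_last (x : Int) (t : List Int) (hx : (0:Int) ≤ x) :
    (x :: t).foldl (fun g k => if k < g + 3 then g else k) (-3)
      = ((pvGre (x :: t)).getLast?).getD 0 := by
  rw [List.foldl_cons, if_neg (by omega : ¬ x < -3 + 3)]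
  rw [pv_fold_aux t x]
  show _ = ((x :: pvGreAux t x).getLast?).getD 0
  rw [pv_last_cons]

-- the Nat-indexed '1' positions of D_ are pvOnes, cast
lemma pv_findIdxs_eq (l : List String) : ∀ s : Nat,
    (List.findIdxs (fun e => e == "1") l s).map (Nat.cast : Nat → Int) = pvOnes l (s : Int) := by
  induction l with
  | nil => intro s; simp [pvOnes]
  | cons e rest ih =>
      intro s
      rw [List.findIdxs_cons]
      by_cases he : e = "1"
      · have hb : (e == "1") = true := by simp [he]
        rw [hb, if_pos rfl, List.map_cons, ih (s+1)]
        simp only [pvOnes, he, reduceIte]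
        push_cast
        rfl
      · have hb : (e == "1") = false := by simp [he]
        rw [hb, if_neg (by simp), ih (s+1)]
        simp only [pvOnes, he, reduceIte]
        push_cast
        rfl

-- the Nat b-fold of D_ is the Int b-fold of the cast list
lemma pv_fold_cast (os : List Nat) : ∀ b : Nat,
    ((os.foldl (fun b k => if k < b then b else k + 3) b : Nat) : Int)
      = (os.map (Nat.cast : Nat → Int)).foldl (fun b k => if k < b then b else k + 3) (b : Int) := by
  induction os with
  | nil => intro b; simp
  | cons k t ih =>
      intro b
      simp only [List.foldl_cons, List.map_cons]
      by_cases h : k < b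
      · rw [if_pos h, if_pos (by exact_mod_cast h), ih]
      · rw [if_neg h, if_neg (by exact_mod_cast h), ih]
        push_cast
        rfl

-- a two-element suffix of the cast list comes from a two-element suffix of the Nat list
lemma pv_suffix_unmap (os : List Nat) (a b : Nat)
    (h : [(a : Int), (b : Int)] <:+ os.map (Nat.cast : Nat → Int)) : [a, b] <:+ os := by
  obtain ⟨t, ht⟩ := h
  obtain ⟨l1, l2, hsplit, _, h2⟩ := List.map_eq_append_iff.mp ht.symm
  rcases l2 with _ | ⟨u, _ | ⟨v, _ | _⟩⟩ <;> simp only [List.map_cons, List.map_nil,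
    List.cons.injEq, List.nil_eq, reduceCtorEq, and_false] at h2
  obtain ⟨hu, hv, -⟩ := h2
  have hua : u = a := by exact_mod_cast hu
  have hvb : v = b := by exact_mod_cast hv
  exact ⟨l1, by rw [hsplit, hua, hvb]⟩

lemma pv_outA (lista : List String) : quitar_duplicados lista
    = (PySem.List.enumerate lista).map
        (fun p => if pvCov (pvAkept (pvOnes lista 0)) p.1 then "-" else p.2) := by
  have hpair : (pvOnes lista 0).Pairwise (· < ·) := pv_ones_pairwise lista 0
  have hloop : pvLoopA (pvOnes lista 0).length (pvOnes lista 0) 0 = pvAkept (pvOnes lista 0) := by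
    have h := pv_loopA_eq (pvOnes lista 0) (pvOnes lista 0).length [] le_rfl
      (by simpa using hpair)
    simpa using h
  simp only [quitar_duplicados]
  rw [pv_onesA_eq, hloop, pv_blank_eq]

lemma pv_outB (lista : List String) : quitar_duplicados_alt lista
    = (PySem.List.enumerate lista).map
        (fun p => if pvCov (pvGre (pvOnes lista 0)) p.1 then "-" else p.2) := by
  simp only [quitar_duplicados_alt]
  rw [pv_foldl_go, pv_go_eq, pv_kept_gre]
  simp only [pvDropWin, List.nil_append, pvWin, Bool.false_or]

lemma pv_gre_ne_nil (x : Int) (t : List Int) : pvGre (x :: t) ≠ [] := by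
  simp [pvGre]

lemma pv_gre_sublist (xs : List Int) : List.Sublist (pvGre xs) xs := by
  suffices H : ∀ (n : Nat) (xs : List Int), xs.length ≤ n → List.Sublist (pvGre xs) xs by
    exact H xs.length xs le_rfl
  intro n
  induction n with
  | zero =>
      intro xs h
      have : xs = [] := List.length_eq_zero_iff.mp (Nat.le_zero.mp h)
      subst this
      simp [pvGre]
  | succ n ih =>
      intro xs h
      rcases xs with _ | ⟨x, t⟩
      · simp [pvGre]
      rw [pv_gre_cons]
      refine List.Sublist.cons₂ x ?_
      exact (ih _ (le_trans (List.length_dropWhile_le _ _) (by simp at h; omega))).trans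
        (List.dropWhile_sublist _)

-- under the D_ shape, A's kept list is exactly the greedy one plus the trailing duplicate
lemma pv_quirk (R : List Int) (hp : R.Pairwise (· < ·)) (y : Int) (hs : [y+1, y+2] <:+ R)
    (t : List Int) (hg : pvGre R = t ++ [y]) : pvAkept R = pvGre R ++ [y+2] := by
  revert hp y hs t hg
  suffices H : ∀ (n : Nat) (R : List Int), R.length ≤ n → R.Pairwise (· < ·) → ∀ (y : Int),
      [y+1, y+2] <:+ R → ∀ (t : List Int), pvGre R = t ++ [y] →
      pvAkept R = pvGre R ++ [y+2] by
    intro hp y hs t hg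
    exact H R.length R le_rfl hp y hs t hg
  intro n
  induction n with
  | zero =>
      intro R hR _ y hs t _
      have hR0 : R = [] := List.length_eq_zero_iff.mp (Nat.le_zero.mp hR)
      subst hR0
      exact absurd (List.suffix_nil.mp hs) (by simp)
  | succ n ih =>
      intro R hR hp y hs t hg
      rcases R with _ | ⟨x, xs⟩
      · exact absurd (List.suffix_nil.mp hs) (by simp)
      have hrel : (x :: xs).Pairwise (· < ·) := hp
      by_cases hguard : xs = [x+1, x+2]
      · subst hguard
        have hgrec : pvGre (x :: (x+1) :: (x+2) :: []) = [x] := by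
          rw [pv_gre_cons]
          simp [show x+1 < x+3 by omega, show x+2 < x+3 by omega, pvGre]
        rw [hgrec] at hg
        have hyx : y = x := by
          rcases t with _ | ⟨a, t'⟩
          · simp at hg; omega
          · exfalso
            have := congrArg List.length hg
            simp at this
        subst hyx
        rw [pvAkept, if_pos rfl, hgrec]
        rfl
      · have hgd : pvGre (x :: xs) = x :: pvGre (xs.dropWhile (fun z => z < x + 3)) :=
          pv_gre_cons x xs
        have hAx : pvAkept (x :: xs) = x :: pvAkept (xs.dropWhile (fun z => z < x + 3)) := by
          rw [pvAkept, if_neg hguard]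
        have hpxs : xs.Pairwise (· < ·) := (List.pairwise_cons.mp hp).2
        have hxlt : ∀ z ∈ xs, x < z := (List.pairwise_cons.mp hp).1
        have hpd : (xs.dropWhile (fun z => z < x + 3)).Pairwise (· < ·) :=
          hpxs.sublist (List.dropWhile_sublist _)
        rw [hgd] at hg
        rcases t with _ | ⟨a, t'⟩
        · -- pvGre d = [], y = x: then every element of xs is < x+3, so xs = [x+1,x+2]: contradiction
          exfalso
          simp only [List.nil_append, List.cons_eq_cons] at hg
          obtain ⟨hxy, hgrenil⟩ := hg
          have hdnil : xs.dropWhile (fun z => z < x + 3) = [] := by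
            rcases hdw : xs.dropWhile (fun z => z < x + 3) with _ | ⟨c, d'⟩
            · rfl
            · rw [hdw] at hgrenil; exact absurd hgrenil (pv_gre_ne_nil c d')
          have hall : ∀ z ∈ xs, z < x + 3 := by
            intro z hz
            have := List.dropWhile_eq_nil_iff.mp hdnil z hz
            simpa using this
          obtain ⟨t2, ht2⟩ := hs
          rcases t2 with _ | ⟨b, t3⟩
          · simp at ht2
            omega
          · rw [List.cons_append, List.cons_eq_cons] at ht2
            obtain ⟨hbx, hxs⟩ := ht2
            rcases t3 with _ | ⟨c, t4⟩
            · apply hguard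
              rw [← hxs]
              subst hxy
              simp
            · -- an element c of xs strictly between x and the ones y+1=x+1: impossible
              have hcxs : c ∈ xs := by rw [← hxs]; simp
              have h1 : x < c := hxlt c hcxs
              have h2 : c < y + 1 := by
                have hpx : xs.Pairwise (· < ·) := hpxs
                rw [← hxs] at hpx
                have := (List.pairwise_cons.mp hpx).1 (y+1) (by simp)
                exact this
              omega
        · -- t = a :: t'
          rw [List.cons_append, List.cons_eq_cons] at hg
          obtain ⟨hxa, hgre'⟩ := hg
          have hsx : [y+1, y+2] <:+ xs := by
            obtain ⟨t2, ht2⟩ := hs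
            rcases t2 with _ | ⟨b, t3⟩
            · exfalso
              rw [List.nil_append, List.cons_eq_cons] at ht2
              obtain ⟨hx1, hxs2⟩ := ht2
              rw [← hxs2] at hgre'
              rw [List.dropWhile_cons, if_pos (by simp; omega)] at hgre'
              simp [pvGre] at hgre'
            · rw [List.cons_append, List.cons_eq_cons] at ht2
              exact ⟨t3, ht2.2⟩
          have hsd : [y+1, y+2] <:+ xs.dropWhile (fun z => z < x + 3) := by
            rcases List.suffix_or_suffix_of_suffix hsx (List.dropWhile_suffix _) with h | h
            · exact h
            · obtain ⟨t4, ht4⟩ := h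
              rcases t4 with _ | ⟨u, t5⟩
              · rw [List.nil_append] at ht4
                rw [ht4]
              · exfalso
                rcases t5 with _ | ⟨v, t6⟩
                · -- dropWhile result = [y+2]
                  have hd2 : xs.dropWhile (fun z => z < x + 3) = [y+2] := by
                    have := congrArg (List.drop 1) ht4
                    simpa using this
                  rw [hd2] at hgre'
                  simp [pvGre, pvGreAux] at hgre'
                  rcases t' with _ | ⟨w, t7⟩
                  · simp at hgre'
                  · have := congrArg List.length hgre'
                    simp at this
                · -- dropWhile result = []
                  have hd0 : xs.dropWhile (fun z => z < x + 3) = [] := by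
                    have hlen := congrArg List.length ht4
                    simp only [List.length_append, List.length_cons, List.length_nil] at hlen
                    exact List.length_eq_zero_iff.mp (by omega)
                  rw [hd0] at hgre'
                  simp [pvGre] at hgre'
          have hlend : (xs.dropWhile (fun z => z < x + 3)).length ≤ n :=
            le_trans (List.length_dropWhile_le _ _)
              (by have := hR; simp only [List.length_cons] at this; omega)
          have hrec := ih _ hlend hpd y hsd t' hgre'
          rw [hAx, hgd, hrec]
          simp

-- ===== VERDICT (by name: the statement is the Claim_ definition above) =====
theorem quitar_duplicados_spec : Claim_unchanged_quitar_duplicados := by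
  intro lista _hDom
  unfold Spec_quitar_duplicados
  intro hnD
  have hpair : (pvOnes lista 0).Pairwise (· < ·) := pv_ones_pairwise lista 0
  rw [pv_outA, pv_outB]
  rcases pv_dichotomy (pvOnes lista 0) hpair with heq | ⟨y, hsuf, hmem, ⟨t, hgt⟩, hak⟩
  · rw [heq]
  · rw [hak]
    apply List.map_congr_left
    intro p hp
    obtain ⟨k, hk, rfl⟩ := (PySem.List.mem_enumerate_iff _ _ _).mp hp
    have hcovapp : pvCov (pvGre (pvOnes lista 0) ++ [y+2]) ((k:Int))
        = (pvCov (pvGre (pvOnes lista 0)) ((k:Int))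
            || (decide (y+2 < (k:Int)) && decide ((k:Int) < y+2+3))) := by
      simp [pvCov, List.any_append]
    by_cases hc : pvCov (pvGre (pvOnes lista 0)) ((k:Int)) = true
    · simp [hcovapp, hc]
    · have hc' : pvCov (pvGre (pvOnes lista 0)) ((k:Int)) = false :=
        Bool.eq_false_iff.mpr hc
      by_cases hj : y+2 < (k:Int) ∧ (k:Int) < y+2+3
      · by_cases hv : lista[k] = "-"
        · simp [hcovapp, hc', hj.1, hj.2, hv]
        · exfalso
          apply hnD
          obtain ⟨t2, ht2⟩ := hsuf
          have hymem : y ∈ pvOnes lista 0 := by rw [← ht2]; simp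
          have hy0 : (0:Int) ≤ y := pv_ones_lb lista 0 y hymem
          have hosmap : (List.findIdxs (fun e => e == "1") lista 0).map (Nat.cast : Nat → Int)
              = pvOnes lista 0 := by simpa using pv_findIdxs_eq lista 0
          have hfold : (pvOnes lista 0).foldl (fun b k => if k < b then b else k + 3) 0
              = y + 3 := by
            have hsh := pv_fold_shift (pvOnes lista 0) (-3)
            rw [show (-3:Int) + 3 = 0 by norm_num] at hsh
            rw [hsh]
            rcases hos2 : pvOnes lista 0 with _ | ⟨x, t3⟩
            · rw [hos2] at hymem; simp at hymem
            · have hx0 : (0:Int) ≤ x := pv_ones_lb lista 0 x (by rw [hos2]; simp)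
              rw [pv_fold_last x t3 hx0, ← hos2, hgt]
              simp
          have hbInt : (((List.findIdxs (fun e => e == "1") lista 0).foldl
              (fun b k => if k < b then b else k + 3) 0 : Nat) : Int) = y + 3 := by
            rw [pv_fold_cast, hosmap, Nat.cast_zero, hfold]
          have hmem2 : lista[k] ∈ List.take 2 (lista.drop (Int.toNat (y+3))) := by
            rcases (by omega : (k:Int) = y + 3 ∨ (k:Int) = y + 4) with hy | hy
            · have ht3 : Int.toNat (y+3) = k := by omega
              rw [ht3, List.drop_eq_getElem_cons hk, List.take_succ_cons]
              exact List.mem_cons_self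
            · have hk1 : k - 1 < lista.length := by omega
              have ht3 : Int.toNat (y+3) = k - 1 := by omega
              rw [ht3, List.drop_eq_getElem_cons hk1]
              have hkk : k - 1 + 1 = k := by omega
              rw [hkk, List.drop_eq_getElem_cons hk, List.take_succ_cons, List.take_succ_cons]
              exact List.mem_cons_of_mem _ List.mem_cons_self
          simp only [D_quitar_duplicados]
          set bN := (List.findIdxs (fun e => e == "1") lista 0).foldl
              (fun b k => if k < b then b else k + 3) 0 with hbN
          refine ⟨?_, ?_⟩
          · apply pv_suffix_unmap
            rw [show ((bN - 2 : Nat) : Int) = y + 1 by omega,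
              show ((bN - 1 : Nat) : Int) = y + 2 by omega, hosmap]
            exact ⟨t2 ++ [y], by rw [← ht2]; simp⟩
          · rw [show bN = Int.toNat (y+3) by omega]
            intro hsub
            have := hsub hmem2
            simp at this
            exact hv this
      · have hj' : (decide (y+2 < (k:Int)) && decide ((k:Int) < y+2+3)) = false := by
          rcases Decidable.not_and_iff_not_or_not.mp hj with h | h <;> simp [h]
        simp [hcovapp, hc', hj']

theorem quitar_duplicados_changed : Claim_changed_quitar_duplicados := by
  unfold Claim_changed_quitar_duplicados; decide

theorem quitar_duplicados_tight : Claim_exact_quitar_duplicados := by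
  intro lista _hDom hD heq
  simp only [D_quitar_duplicados] at hD
  obtain ⟨hsuf0, hobs⟩ := hD
  have hpair := pv_ones_pairwise lista 0
  have hosmap : (List.findIdxs (fun e => e == "1") lista 0).map (Nat.cast : Nat → Int)
      = pvOnes lista 0 := by simpa using pv_findIdxs_eq lista 0
  set bN := (List.findIdxs (fun e => e == "1") lista 0).foldl
      (fun b k => if k < b then b else k + 3) 0 with hbN
  -- the '1' list is nonempty; its head is ≥ 0
  rcases hos : pvOnes lista 0 with _ | ⟨x, xs⟩
  · exfalso
    have hnil : List.findIdxs (fun e => e == "1") lista 0 = [] := by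
      have := hosmap
      rw [hos] at this
      exact List.map_eq_nil_iff.mp this
    rw [hnil] at hsuf0
    exact absurd (List.suffix_nil.mp hsuf0) (by simp)
  have hx0 : (0:Int) ≤ x := pv_ones_lb lista 0 x (by rw [hos]; simp)
  have hgne : pvGre (pvOnes lista 0) ≠ [] := by rw [hos]; exact pv_gre_ne_nil x xs
  set g := (pvGre (pvOnes lista 0)).getLast hgne with hgdef
  -- the Int value of D_'s fold is g + 3
  have hbInt : ((bN : Nat) : Int) = g + 3 := by
    rw [hbN, pv_fold_cast, hosmap, Nat.cast_zero]
    have hsh := pv_fold_shift (pvOnes lista 0) (-3)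
    rw [show (-3:Int) + 3 = 0 by norm_num] at hsh
    rw [hsh]
    have hfl : (pvOnes lista 0).foldl (fun g k => if k < g + 3 then g else k) (-3) = g := by
      conv_lhs => rw [hos]
      rw [pv_fold_last x xs hx0, ← hos, List.getLast?_eq_some_getLast hgne]
      rfl
    rw [hfl]
  have hgl : pvGre (pvOnes lista 0) = (pvGre (pvOnes lista 0)).dropLast ++ [g] :=
    (List.dropLast_concat_getLast hgne).symm
  have hg0 : (0:Int) ≤ g := by
    have hmem : g ∈ pvGre (pvOnes lista 0) := by rw [hgl]; simp
    exact pv_ones_lb lista 0 g ((pv_gre_sublist _).subset hmem)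
  -- the Int version of D_'s suffix condition
  have hsufInt : [g+1, g+2] <:+ pvOnes lista 0 := by
    have h := hsuf0.map (Nat.cast : Nat → Int)
    rw [hosmap] at h
    simpa [show ((bN - 2 : Nat) : Int) = g + 1 by omega,
      show ((bN - 1 : Nat) : Int) = g + 2 by omega] using h
  obtain ⟨t2, ht2⟩ := hsufInt
  -- A keeps the duplicate g+2 as well
  have hak : pvAkept (pvOnes lista 0) = pvGre (pvOnes lista 0) ++ [g+2] :=
    pv_quirk (pvOnes lista 0) hpair g ⟨t2, ht2⟩ _ hgl
  -- D_'s blanked region starts at Int.toNat (g+3)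
  rw [show bN = Int.toNat (g + 3) by omega] at hobs
  -- every greedy marker is ≤ g
  have hbound : ∀ k ∈ pvGre (pvOnes lista 0), k ≤ g := by
    have hgpair : (pvGre (pvOnes lista 0)).Pairwise (· < ·) :=
      hpair.sublist (pv_gre_sublist _)
    rw [hgl] at hgpair
    intro k hk
    rw [hgl] at hk
    rcases List.mem_append.mp hk with h | h
    · have := (List.pairwise_append.mp hgpair).2.2 k h g (by simp)
      omega
    · simp at h
      omega
  -- the visible cell that only A blanks
  obtain ⟨e, he, hne⟩ : ∃ e ∈ List.take 2 (lista.drop (Int.toNat (g+3))), e ∉ (["-"] : List String) := by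
    simpa [List.subset_def, not_forall] using hobs
  obtain ⟨i, hi, hei⟩ := List.mem_iff_getElem.mp he
  have hi2 : i < 2 ∧ Int.toNat (g+3) + i < lista.length := by
    simp only [List.length_take, List.length_drop] at hi
    omega
  have hjlt : Int.toNat (g+3) + i < lista.length := hi2.2
  have hval : lista[Int.toNat (g+3) + i] = e := by
    rw [List.getElem_take, List.getElem_drop] at hei
    exact hei
  have hjint : ((Int.toNat (g+3) + i : Nat) : Int) = g + 3 + i := by
    push_cast
    omega
  have hne' : e ≠ "-" := by simpa using hne
  -- A blanks the cell, B keeps it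
  have hAj : (quitar_duplicados lista)[Int.toNat (g+3) + i]? = some "-" := by
    rw [pv_outA, List.getElem?_map, PySem.List.getElem?_enumerate,
      List.getElem?_eq_getElem hjlt]
    have hcov : pvCov (pvAkept (pvOnes lista 0)) (g + 3 + (i:Int)) = true := by
      rw [hak]
      simp only [pvCov, List.any_append, List.any_cons, List.any_nil]
      have h1 : decide (g + 2 < g + 3 + (i:Int)) = true := decide_eq_true (by omega)
      have h2 : decide (g + 3 + (i:Int) < g + 2 + 3) = true := decide_eq_true (by omega)
      simp [h1, h2]
    simp only [Option.map_some, zero_add, hjint, hcov]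
    simp
  have hBj : (quitar_duplicados_alt lista)[Int.toNat (g+3) + i]? = some e := by
    rw [pv_outB, List.getElem?_map, PySem.List.getElem?_enumerate,
      List.getElem?_eq_getElem hjlt]
    have hcov : pvCov (pvGre (pvOnes lista 0)) (g + 3 + (i:Int)) = false := by
      simp only [pvCov, List.any_eq_false]
      intro k hk
      have hkg : k ≤ g := hbound k hk
      simp only [Bool.and_eq_true, decide_eq_true_eq, not_and]
      intro _
      omega
    simp only [Option.map_some, zero_add, hjint, hcov]
    simp [hval]
  rw [heq, hBj] at hAj
  exact hne' (Option.some.inj hAj)
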